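-- pv_equiv track=rewrite | github.com/1BaEdeV/SPbU-AM-CP-Numerical-Methods | Решение_СЛАУ/funcs.py | is_vector
-- ===== SOURCE A (Python) =====
-- def is_vector(matrix):
--     """Проверяет, является ли матрица вектором, где первый столбец содержит элементы,
--     а остальные столбцы заполнены нулями."""
--
--     # Проверка на пустую матрицу
--     if not matrix or not matrix[0]:
--         return False
--
--     # Получаем количество строк и столбцов
--     rows = len(matrix)
--     cols = len(matrix[0])
--
--     # Проверка, что все строки имеют одинаковую длину
--     for row in matrix:
--         if len(row) != cols:
--             return False
--
--     # Проверка первого столбца и остальных столбцов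
--     for i in range(rows):
--         if matrix[i][0] != 0 and any(matrix[i][j] != 0 for j in range(1, cols)):
--             return False  # Если первый элемент не равен нулю, а есть ненулевые элементы в других столбцах
--         if matrix[i][0] == 0 and any(matrix[i][j] != 0 for j in range(cols)):
--             return False  # Если первый элемент равен нулю, но есть ненулевые элементы в других столбцах
--
--     # Если все проверки пройдены, матрица является вектором
--     return True
-- ===== SOURCE B (Python) =====
-- def is_vector(matrix):
--     """Check the matrix is a column vector: non-empty, rectangular, and every
--     entry outside column 0 is zero (checked column-wise on the transpose)."""
--     if not matrix or not matrix[0]: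
--         return False
--     cols = len(matrix[0])
--     for row in matrix:
--         if len(row) != cols:
--             return False
--     columns = list(zip(*matrix))
--     return all(not any(col) for col in columns[1:])
-- ===== Notes on version B (the rewrite author's own statement) =====
-- stated objective: alternative
-- what changed: Keeps A's emptiness and rectangularity guards but replaces A's row-wise index loop with its two redundant branches on matrix[i][0] by transposing the matrix with zip(*matrix) and checking column-wise that every column after the first is all zero.
import Mathlib
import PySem

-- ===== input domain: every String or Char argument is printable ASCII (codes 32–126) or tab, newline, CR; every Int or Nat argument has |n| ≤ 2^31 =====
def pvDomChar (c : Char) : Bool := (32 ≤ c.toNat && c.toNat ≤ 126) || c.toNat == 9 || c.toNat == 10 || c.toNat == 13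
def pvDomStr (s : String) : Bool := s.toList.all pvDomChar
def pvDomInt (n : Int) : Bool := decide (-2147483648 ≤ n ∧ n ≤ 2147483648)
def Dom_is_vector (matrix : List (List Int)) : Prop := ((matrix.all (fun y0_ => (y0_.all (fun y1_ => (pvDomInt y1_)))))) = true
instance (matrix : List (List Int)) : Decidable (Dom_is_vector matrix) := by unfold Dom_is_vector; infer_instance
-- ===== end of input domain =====

-- B keeps A's emptiness and rectangularity guards but replaces A's row-wise
-- double-branch loop by transposing with zip(*matrix) and checking column-wise
-- that every column after the first is all zero (objective: alternative).

-- ===== PORT A =====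
-- literal transliteration of A: guards, then an index loop i in range(rows)
-- with the two early-return branches, each scanning with any() over a range of j
def is_vector (matrix : List (List Int)) : Bool :=
  match matrix with
  | [] => false                        -- not matrix
  | r0 :: _ =>
    if r0.isEmpty then false           -- not matrix[0]
    else
      let rows : Int := matrix.length
      let cols : Int := r0.length
      -- for row in matrix: if len(row) != cols: return False
      if matrix.any (fun row => (row.length : Int) ≠ cols) then false
      else
        -- for i in range(rows): two early-return branches
        (PySem.List.pyRange 0 rows 1).all (fun i =>
          let mi := PySem.List.pyGetD matrix i []
          if PySem.List.pyGetD mi 0 0 ≠ 0 ∧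
             (PySem.List.pyRange 1 cols 1).any (fun j => PySem.List.pyGetD mi j 0 ≠ 0) then
            false
          else if PySem.List.pyGetD mi 0 0 = 0 ∧
             (PySem.List.pyRange 0 cols 1).any (fun j => PySem.List.pyGetD mi j 0 ≠ 0) then
            false
          else true)

-- ===== PORT B =====
-- zip(*matrix): columns until the shortest row runs out (exact for Python's zip
-- of the unpacked rows; truncation never matters after the rectangularity guard)
def pyZipStar (m : List (List Int)) : List (List Int) :=
  if m.isEmpty || m.any (fun r => r.isEmpty) then []
  else (m.map (fun r => r.headD 0)) :: pyZipStar (m.map List.tail)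
termination_by (m.headD []).length
decreasing_by
  rename_i h
  match m with
  | [] => simp at h
  | r :: t =>
    simp only [List.isEmpty_cons, Bool.false_or, List.any_eq_true, List.isEmpty_iff] at h
    cases r with
    | nil => exact absurd ⟨([] : List Int), by simp, rfl⟩ h
    | cons a s => simp

-- literal transliteration of B: same guards, then transpose and scan columns[1:]
def is_vector_alt (matrix : List (List Int)) : Bool :=
  match matrix with
  | [] => false
  | r0 :: _ =>
    if r0.isEmpty then false
    else
      let cols := r0.length
      if matrix.any (fun row => row.length ≠ cols) then false
      else
        (PySem.List.slice (pyZipStar matrix) (some 1) none).all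
          (fun col => !(col.any (fun x => x ≠ 0)))

-- ===== PRECONDITION & SPEC =====
def Spec_is_vector (matrix : List (List Int)) (out : Bool) : Prop := out = is_vector_alt matrix
instance (matrix : List (List Int)) (out : Bool) : Decidable (Spec_is_vector matrix out) := by unfold Spec_is_vector; infer_instance

-- ===== CLAIM (what is proved, stated in full; the proofs are below) =====
def Claim_equal_is_vector : Prop := ∀ (matrix : List (List Int)), Dom_is_vector matrix → Spec_is_vector matrix (is_vector matrix)

-- ===== LEMMAS AND PROOFS =====

-- A's per-row double branch equals "the tail of the row is all zero",
-- for a non-empty row of length cols.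
lemma row_body_eq (row : List Int) (hne : row ≠ []) (cols : Int)
    (hlen : (row.length : Int) = cols) :
    (if PySem.List.pyGetD row 0 0 ≠ 0 ∧
        (PySem.List.pyRange 1 cols 1).any (fun j => PySem.List.pyGetD row j 0 ≠ 0) then
       false
     else if PySem.List.pyGetD row 0 0 = 0 ∧
        (PySem.List.pyRange 0 cols 1).any (fun j => PySem.List.pyGetD row j 0 ≠ 0) then
       false
     else true)
    = row.tail.all (fun x => x == 0) := by
  obtain ⟨a, t, rfl⟩ := List.exists_cons_of_ne_nil hne
  have h0 : PySem.List.pyGetD (a :: t) (0 : Int) (0 : Int) = a :=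
    PySem.List.pyGetD_zero_cons _ _ _
  have hpos : (0 : Int) < cols := by
    have : (0:Int) < ((a :: t).length : Int) := by exact_mod_cast Nat.succ_pos t.length
    omega
  have hsplit : PySem.List.pyRange 0 cols 1 = 0 :: PySem.List.pyRange 1 cols 1 :=
    PySem.List.pyRange_one_cons hpos
  have hmap := PySem.List.map_pyGetD_pyRange (a := 1) (xs := a :: t) (d := (0:Int)) (by omega)
  simp only [PySem.List.len_eq] at hmap
  have hmap' : List.map (fun j => PySem.List.pyGetD (a :: t) j 0)
      (PySem.List.pyRange 1 (((a :: t).length : Int)) 1) = t := by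
    rw [hmap]; rfl
  have htail :
      (PySem.List.pyRange 1 cols 1).any (fun j => decide (PySem.List.pyGetD (a :: t) j 0 ≠ 0))
      = t.any (fun x => decide (x ≠ 0)) := by
    rw [← hlen]
    have h := List.any_map (f := fun j => PySem.List.pyGetD (a :: t) j 0)
      (l := PySem.List.pyRange 1 (((a :: t).length : Int)) 1) (p := fun x => decide (x ≠ 0))
    rw [hmap'] at h
    exact h.symm
  rw [hsplit, List.any_cons, h0, htail]
  by_cases ha : a = 0
  · subst ha
    simp [List.all_eq_not_any_not, List.any_eq]
  · simp [ha, List.all_eq_not_any_not, List.any_eq]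

-- the index loop over range(rows) equals the flat per-row tail check
lemma loop_eq (matrix : List (List Int)) (cols : Int)
    (hlen : ∀ row ∈ matrix, (row.length : Int) = cols) (hnil : [] ∉ matrix) :
    (PySem.List.pyRange 0 (matrix.length : Int) 1).all (fun i =>
      let mi := PySem.List.pyGetD matrix i []
      if PySem.List.pyGetD mi 0 0 ≠ 0 ∧
         (PySem.List.pyRange 1 cols 1).any (fun j => PySem.List.pyGetD mi j 0 ≠ 0) then
        false
      else if PySem.List.pyGetD mi 0 0 = 0 ∧
         (PySem.List.pyRange 0 cols 1).any (fun j => PySem.List.pyGetD mi j 0 ≠ 0) then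
        false
      else true)
    = matrix.all (fun row => row.tail.all (fun x => x == 0)) := by
  have hmap := PySem.List.map_pyGetD_pyRange_zero (xs := matrix) (d := ([] : List Int))
  simp only [PySem.List.len_eq] at hmap
  have h2 : (List.map (fun i => PySem.List.pyGetD matrix i [])
        (PySem.List.pyRange 0 ((matrix.length : Int)) 1)).all (fun row =>
      if PySem.List.pyGetD row 0 0 ≠ 0 ∧
         (PySem.List.pyRange 1 cols 1).any (fun j => PySem.List.pyGetD row j 0 ≠ 0) then
        false
      else if PySem.List.pyGetD row 0 0 = 0 ∧
         (PySem.List.pyRange 0 cols 1).any (fun j => PySem.List.pyGetD row j 0 ≠ 0) then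
        false
      else true)
      = matrix.all (fun row => row.tail.all (fun x => x == 0)) := by
    rw [hmap, Bool.eq_iff_iff, List.all_eq_true, List.all_eq_true]
    constructor
    · intro H row hrow
      rw [← row_body_eq row (fun h => hnil (h ▸ hrow)) cols (hlen row hrow)]
      exact H row hrow
    · intro H row hrow
      rw [row_body_eq row (fun h => hnil (h ▸ hrow)) cols (hlen row hrow)]
      exact H row hrow
  exact (List.all_map (l := PySem.List.pyRange 0 ((matrix.length : Int)) 1)
    (f := fun i => PySem.List.pyGetD matrix i [])
    (p := fun row =>
      if PySem.List.pyGetD row 0 0 ≠ 0 ∧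
         (PySem.List.pyRange 1 cols 1).any (fun j => PySem.List.pyGetD row j 0 ≠ 0) then
        false
      else if PySem.List.pyGetD row 0 0 = 0 ∧
         (PySem.List.pyRange 0 cols 1).any (fun j => PySem.List.pyGetD row j 0 ≠ 0) then
        false
      else true)).symm.trans h2

-- Boolean conjunctions commute across four factors
lemma and4_comm (x y z w : Bool) : ((x && y) && (z && w)) = ((x && z) && (y && w)) := by
  cases x <;> cases y <;> cases z <;> cases w <;> rfl

-- a column has no nonzero entry iff it is all zero
lemma not_any_ne (l : List Int) :
    (!(l.any (fun x => decide (x ≠ 0)))) = l.all (fun x => x == 0) := by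
  rw [Bool.eq_iff_iff]
  simp

-- heads-all-zero and tails-all-zero together equal rows-all-zero
lemma heads_tails : ∀ (m : List (List Int)), (∀ r ∈ m, r ≠ []) →
    (((m.map (fun r => r.headD 0)).all (fun a => a == 0)) &&
      ((m.map List.tail).all (fun r => r.all (fun x => x == 0))))
    = m.all (fun r => r.all (fun x => x == 0)) := by
  intro m
  induction m with
  | nil => simp
  | cons r t ih =>
    intro hne
    obtain ⟨a, s, rfl⟩ := List.exists_cons_of_ne_nil (hne r (by simp))
    simp only [List.map_cons, List.all_cons, List.headD_cons, List.tail_cons]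
    rw [← ih (fun u hu => hne u (List.mem_cons_of_mem _ hu))]
    rw [and4_comm]

-- the transpose of a rectangular matrix is all-zero iff the matrix is
lemma zip_all_zero : ∀ (k : Nat) (m : List (List Int)), (∀ r ∈ m, r.length = k) →
    ((pyZipStar m).all (fun col => !(col.any (fun x => decide (x ≠ 0)))))
    = m.all (fun r => r.all (fun x => x == 0)) := by
  intro k
  induction k with
  | zero =>
    intro m hk
    have hz : pyZipStar m = [] := by
      cases m with
      | nil => simp [pyZipStar]
      | cons r t =>
        rw [pyZipStar]
        have : r.isEmpty = true := by
          simp [List.length_eq_zero_iff.mp (hk r (by simp))]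
        simp [this]
    rw [hz]
    simp only [List.all_nil]
    symm
    rw [List.all_eq_true]
    intro r hr
    have : r = [] := List.length_eq_zero_iff.mp (hk r hr)
    simp [this]
  | succ n ih =>
    intro m hk
    cases m with
    | nil => simp [pyZipStar]
    | cons r t =>
      have hne : ∀ s ∈ (r :: t), s ≠ [] := by
        intro s hs h; have := hk s hs; simp [h] at this
      rw [pyZipStar]
      have hguard : ((r :: t).isEmpty || (r :: t).any (fun s => s.isEmpty)) = false := by
        simp only [List.isEmpty_cons, Bool.false_or, List.any_eq_false]
        intro s hs
        simpa using hne s hs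
      rw [hguard]
      simp only [Bool.false_eq_true, if_false, List.all_cons]
      have htails : ∀ s ∈ (r :: t).map List.tail, s.length = n := by
        intro s hs
        obtain ⟨u, hu, rfl⟩ := List.mem_map.mp hs
        simp [List.length_tail, hk u hu]
      rw [ih _ htails, not_any_ne, heads_tails _ hne, List.all_cons]

-- B's column scan equals the flat per-row tail check on a rectangular matrix
lemma alt_eq (matrix : List (List Int)) (hmne : matrix ≠ [])
    (hlen : ∀ row ∈ matrix, row.length = (matrix.headD []).length)
    (hnil : [] ∉ matrix) :
    ((PySem.List.slice (pyZipStar matrix) (some 1) none).all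
        (fun col => !(col.any (fun x => decide (x ≠ 0)))))
    = matrix.all (fun row => row.tail.all (fun x => x == 0)) := by
  obtain ⟨r, t, rfl⟩ := List.exists_cons_of_ne_nil hmne
  have hrne : r ≠ [] := fun h => hnil (by simp [h])
  rw [pyZipStar]
  have hguard : ((r :: t).isEmpty || (r :: t).any (fun s => s.isEmpty)) = false := by
    simp only [List.isEmpty_cons, Bool.false_or, List.any_eq_false]
    intro s hs
    simp [List.isEmpty_iff]
    exact fun h => hnil (h ▸ hs)
  rw [hguard]
  simp only [Bool.false_eq_true, if_false]
  rw [PySem.List.slice_from_one]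
  simp only [List.tail_cons]
  have hk : ∀ s ∈ (r :: t).map List.tail, s.length = r.length - 1 := by
    intro s hs
    obtain ⟨u, hu, rfl⟩ := List.mem_map.mp hs
    have := hlen u hu
    simp only [List.headD_cons] at this
    simp [List.length_tail, this]
  rw [zip_all_zero (r.length - 1) _ hk]
  simp [List.all_map, Function.comp_def]

-- ===== VERDICT (by name: the statement is the Claim_ definition above) =====
theorem is_vector_spec : Claim_equal_is_vector := by
  intro matrix _
  unfold Spec_is_vector is_vector is_vector_alt
  match matrix with
  | [] => rfl
  | r0 :: rest =>
    by_cases h0 : r0.isEmpty = true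
    · simp only [h0, if_true]
    · simp only [Bool.not_eq_true] at h0
      simp only [h0, Bool.false_eq_true, if_false]
      have hg : ((r0 :: rest).any fun row => decide ((row.length : Int) ≠ ((r0.length : Nat) : Int)))
          = ((r0 :: rest).any fun row => decide (row.length ≠ r0.length)) := by
        apply List.any_congr rfl
        intro row
        simp
      rw [hg]
      by_cases hB : ((r0 :: rest).any fun row => decide (row.length ≠ r0.length)) = true
      · rw [hB]
        simp
      · simp only [Bool.not_eq_true] at hB
        rw [hB]
        simp only [Bool.false_eq_true, if_false]
        have heq : ∀ row ∈ (r0 :: rest), row.length = r0.length := by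
          intro row hm
          have := List.any_eq_false.mp hB row hm
          simpa using this
        have heqI : ∀ row ∈ (r0 :: rest), (row.length : Int) = ((r0.length : Nat) : Int) := by
          intro row hm; exact_mod_cast heq row hm
        have hnil : [] ∉ (r0 :: rest) := by
          intro hm
          have h1 : ([] : List Int).length = r0.length := heq [] hm
          have : r0 = [] := List.length_eq_zero_iff.mp h1.symm
          rw [this] at h0
          simp at h0
        rw [loop_eq (r0 :: rest) ((r0.length : Nat) : Int) heqI hnil]
        exact (alt_eq (r0 :: rest) (by simp) (by simpa using heq) hnil).symm
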